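-- pv_equiv track=rewrite | github.com/EYErbil/MOF-Bandgap-Discovery | discovery/nominate_diverse_dft.py | strategy_uncertainty_quota
-- ===== SOURCE A (Python) =====
-- from collections import defaultdict
--
-- def strategy_uncertainty_quota(pool_cids, pool_combined_score,
--                                cluster_labels, budget, max_per_cluster):
--     """Like cluster_quota but ranks within each cluster by a combined
--     quality + uncertainty + disagreement score (lower = better)."""
--     cluster_members = defaultdict(list)
--     for i, c in enumerate(pool_cids):
--         cluster_members[cluster_labels[i]].append(i)
--
--     for cl in cluster_members:
--         cluster_members[cl].sort(key=lambda i: pool_combined_score[i])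
--
--     cluster_order = sorted(cluster_members.keys(),
--                            key=lambda cl: pool_combined_score[cluster_members[cl][0]])
--
--     selected = []
--     selected_set = set()
--     picked_per_cluster = defaultdict(int)
--     pointer = {cl: 0 for cl in cluster_order}
--
--     while len(selected) < budget:
--         progress = False
--         for cl in cluster_order:
--             if len(selected) >= budget:
--                 break
--             if picked_per_cluster[cl] >= max_per_cluster:
--                 continue
--             members = cluster_members[cl]
--             while pointer[cl] < len(members):
--                 idx = members[pointer[cl]]
--                 pointer[cl] += 1
--                 if idx not in selected_set:
--                     selected.append(idx)
--                     selected_set.add(idx)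
--                     picked_per_cluster[cl] += 1
--                     progress = True
--                     break
--             else:
--                 continue
--         if not progress:
--             max_per_cluster += 1
--
--     return [pool_cids[i] for i in selected[:budget]]
-- ===== SOURCE B (Python) =====
-- def strategy_uncertainty_quota(pool_cids, pool_combined_score,
--                                cluster_labels, budget, max_per_cluster):
--     # One global stable sort + a single round-robin interleave over per-cluster
--     # queues.  A's growing quota never changes the pick order (a blocked cluster
--     # is unblocked exactly one bump later), so max_per_cluster is not consulted.
--     n = len(pool_cids)
--     by_score = sorted(range(n), key=lambda i: pool_combined_score[i])
--     buckets = {cl: [] for cl in dict.fromkeys(cluster_labels[:n])}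
--     for i in by_score:
--         buckets[cluster_labels[i]].append(i)
--     queues = sorted(buckets.values(), key=lambda q: pool_combined_score[q[0]])
--     picks = []
--     k = 0
--     active = list(queues)
--     while active and len(picks) < budget:
--         nxt = []
--         for q in active:
--             if len(picks) >= budget:
--                 break
--             picks.append(q[k])
--             if len(q) > k + 1:
--                 nxt.append(q)
--         active, k = nxt, k + 1
--     return [pool_cids[i] for i in picks[:budget]]
-- ===== Notes on version B (the rewrite author's own statement) =====
-- stated objective: alternative
-- what changed: Replaces the quota-bumping multi-pass simulation (re-scanning every cluster each pass, with per-cluster pointer/quota dicts) by one global stable sort of the indices plus a single round-robin interleave over active queues, using the fact that A's growing quota never alters the pick order; max_per_cluster is provably irrelevant.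
import Mathlib
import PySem

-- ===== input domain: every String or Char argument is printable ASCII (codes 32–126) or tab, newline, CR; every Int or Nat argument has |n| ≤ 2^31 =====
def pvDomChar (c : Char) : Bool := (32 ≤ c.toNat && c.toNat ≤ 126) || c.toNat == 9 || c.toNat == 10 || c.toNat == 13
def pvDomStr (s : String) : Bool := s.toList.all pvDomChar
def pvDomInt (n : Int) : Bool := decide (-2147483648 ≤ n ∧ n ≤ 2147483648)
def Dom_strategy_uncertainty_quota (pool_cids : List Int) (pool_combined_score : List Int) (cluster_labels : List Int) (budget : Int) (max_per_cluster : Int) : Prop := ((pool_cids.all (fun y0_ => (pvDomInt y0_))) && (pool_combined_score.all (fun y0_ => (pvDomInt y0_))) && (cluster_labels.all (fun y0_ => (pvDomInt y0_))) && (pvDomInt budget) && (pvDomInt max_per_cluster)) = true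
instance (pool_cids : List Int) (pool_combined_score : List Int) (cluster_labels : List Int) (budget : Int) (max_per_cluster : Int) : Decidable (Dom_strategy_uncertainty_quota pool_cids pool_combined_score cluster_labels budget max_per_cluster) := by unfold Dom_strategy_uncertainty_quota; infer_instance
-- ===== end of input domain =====

-- ===== PORT A =====
-- A: dict-of-queues with per-cluster pointers/quotas; outer while simulates
-- round-robin passes, bumping the quota when a full pass makes no progress.
-- (Outer while ported with a fuel counter that only guards totality.)

structure AState where
  sel : List Int
  selSet : List Int
  picked : PySem.Dict Int Int
  pointer : PySem.Dict Int Int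
  progress : Bool
  deriving Repr, DecidableEq

-- inner 'while pointer[cl] < len(members)' scan
def AinnerScan : Nat → List Int → Int → List Int → Int × Option Int
  | 0, _, ptr, _ => (ptr, none)
  | fuel + 1, members, ptr, s =>
    if ptr < (members.length : Int) then
      let idx := PySem.List.pyGetD members ptr 0
      if idx ∈ s then AinnerScan fuel members (ptr + 1) s
      else (ptr + 1, some idx)
    else (ptr, none)

-- one 'for cl in cluster_order' pass (with the two break conditions)
def ApassA (mem : PySem.Dict Int (List Int)) (budget cap : Int) : List Int → AState → AState
  | [], st => st
  | cl :: rest, st =>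
    if (st.sel.length : Int) ≥ budget then st
    else if st.picked.getD cl 0 ≥ cap then ApassA mem budget cap rest st
    else
      let members := mem.getD cl []
      match AinnerScan members.length members (st.pointer.getD cl 0) st.selSet with
      | (ptr', some idx) =>
        ApassA mem budget cap rest
          { sel := st.sel ++ [idx], selSet := PySem.Set.add st.selSet idx,
            picked := st.picked.modify cl 0 (· + 1),
            pointer := st.pointer.insert cl ptr', progress := true }
      | (ptr', none) =>
        ApassA mem budget cap rest { st with pointer := st.pointer.insert cl ptr' }

-- 'while len(selected) < budget' (fuel = totality guard only)
def AloopA (mem : PySem.Dict Int (List Int)) (co : List Int) (budget : Int) : Nat → Int → AState → List Int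
  | 0, _, st => st.sel
  | fuel + 1, cap, st =>
    if (st.sel.length : Int) < budget then
      let st' := ApassA mem budget cap co { st with progress := false }
      if st'.progress then AloopA mem co budget fuel cap st'
      else AloopA mem co budget fuel (cap + 1) st'
    else st.sel

def Amem1 (pool_cids cluster_labels : List Int) : PySem.Dict Int (List Int) :=
  (PySem.List.enumerate pool_cids 0).foldl
    (fun d p => d.modify (PySem.List.pyGetD cluster_labels p.1 0) [] (· ++ [p.1]))
    PySem.Dict.empty

def Amem2 (pool_cids pool_combined_score cluster_labels : List Int) : PySem.Dict Int (List Int) :=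
  (Amem1 pool_cids cluster_labels).keys.foldl
    (fun d cl => d.modify cl []
      (fun ms => PySem.List.sorted ms (fun i => PySem.List.pyGetD pool_combined_score i 0) false))
    (Amem1 pool_cids cluster_labels)

def Aco (pool_cids pool_combined_score cluster_labels : List Int) : List Int :=
  PySem.List.sorted (Amem2 pool_cids pool_combined_score cluster_labels).keys
    (fun cl => PySem.List.pyGetD pool_combined_score
      (PySem.List.pyGetD ((Amem2 pool_cids pool_combined_score cluster_labels).getD cl []) 0 0) 0) false

def strategy_uncertainty_quota (pool_cids : List Int) (pool_combined_score : List Int) (cluster_labels : List Int) (budget : Int) (max_per_cluster : Int) : List Int :=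
  let mem2 := Amem2 pool_cids pool_combined_score cluster_labels
  let co := Aco pool_cids pool_combined_score cluster_labels
  let pointer := co.foldl (fun d cl => d.insert cl (0 : Int)) PySem.Dict.empty
  let sel := AloopA mem2 co budget (2 * budget.toNat + (1 - max_per_cluster).toNat + 3)
    max_per_cluster ⟨[], [], PySem.Dict.empty, pointer, false⟩
  (PySem.List.slice sel none (some budget)).map (fun i => PySem.List.pyGetD pool_cids i 0)

-- ===== PORT B =====
-- B: one global stable sort of the indices, per-cluster queues read off it,
-- then a single round-robin interleave with an active-queue list.
-- (While loop ported with a fuel counter that only guards totality.)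

-- inner 'for q in active' pass: returns (picks, next active list)
def Bpass (budget k : Int) : List (List Int) → List Int → List (List Int) → List Int × List (List Int)
  | [], picks, nxt => (picks, nxt)
  | q :: rest, picks, nxt =>
    if (picks.length : Int) ≥ budget then (picks, nxt)
    else
      let picks' := picks ++ [PySem.List.pyGetD q k 0]
      let nxt' := if (q.length : Int) > k + 1 then nxt ++ [q] else nxt
      Bpass budget k rest picks' nxt'

-- 'while active and len(picks) < budget'
def Bloop (budget : Int) : Nat → List (List Int) → Int → List Int → List Int
  | 0, _, _, picks => picks
  | fuel + 1, active, k, picks =>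
    if active ≠ [] ∧ (picks.length : Int) < budget then
      let r := Bpass budget k active picks []
      Bloop budget fuel r.2 (k + 1) r.1
    else picks

def Bby_score (pool_cids pool_combined_score : List Int) : List Int :=
  PySem.List.sorted (PySem.List.pyRange 0 (pool_cids.length : Int) 1)
    (fun i => PySem.List.pyGetD pool_combined_score i 0) false

def Bbuckets (pool_cids pool_combined_score cluster_labels : List Int) : PySem.Dict Int (List Int) :=
  (Bby_score pool_cids pool_combined_score).foldl
    (fun d i => d.modify (PySem.List.pyGetD cluster_labels i 0) [] (· ++ [i]))
    ((PySem.List.dedup (PySem.List.slice cluster_labels none (some (pool_cids.length : Int)))).foldl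
      (fun d cl => d.insert cl ([] : List Int)) PySem.Dict.empty)

def Bqueues (pool_cids pool_combined_score cluster_labels : List Int) : List (List Int) :=
  PySem.List.sorted (Bbuckets pool_cids pool_combined_score cluster_labels).values
    (fun q => PySem.List.pyGetD pool_combined_score (PySem.List.pyGetD q 0 0) 0) false

def strategy_uncertainty_quota_alt (pool_cids : List Int) (pool_combined_score : List Int) (cluster_labels : List Int) (budget : Int) (max_per_cluster : Int) : List Int :=
  let queues := Bqueues pool_cids pool_combined_score cluster_labels
  let picks := Bloop budget ((queues.map List.length).sum + 1) queues 0 []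
  (PySem.List.slice picks none (some budget)).map (fun i => PySem.List.pyGetD pool_cids i 0)

-- ===== PRECONDITION & SPEC =====
-- Pre_ excludes exactly the inputs where the Python A does not return normally:
-- shorter score/label lists (IndexError) and budget > len(pool_cids) (the
-- quota-bump while loop then spins forever).
def Pre_strategy_uncertainty_quota (pool_cids : List Int) (pool_combined_score : List Int) (cluster_labels : List Int) (budget : Int) (max_per_cluster : Int) : Prop :=
  pool_cids.length ≤ pool_combined_score.length ∧ pool_cids.length ≤ cluster_labels.length ∧ budget ≤ (pool_cids.length : Int)
instance (pool_cids : List Int) (pool_combined_score : List Int) (cluster_labels : List Int) (budget : Int) (max_per_cluster : Int) : Decidable (Pre_strategy_uncertainty_quota pool_cids pool_combined_score cluster_labels budget max_per_cluster) := by unfold Pre_strategy_uncertainty_quota; infer_instance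

def pvWitness_strategy_uncertainty_quota : List Int × List Int × List Int × Int × Int :=
  ([10, 20, 30, 40], [3, 1, 2, 1], [0, 1, 0, 1], 3, 1)

def Spec_strategy_uncertainty_quota (pool_cids : List Int) (pool_combined_score : List Int) (cluster_labels : List Int) (budget : Int) (max_per_cluster : Int) (out : List Int) : Prop := out = strategy_uncertainty_quota_alt pool_cids pool_combined_score cluster_labels budget max_per_cluster
instance (pool_cids : List Int) (pool_combined_score : List Int) (cluster_labels : List Int) (budget : Int) (max_per_cluster : Int) (out : List Int) : Decidable (Spec_strategy_uncertainty_quota pool_cids pool_combined_score cluster_labels budget max_per_cluster out) := by unfold Spec_strategy_uncertainty_quota; infer_instance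

-- ===== CLAIM (what is proved, stated in full; the proofs are below) =====
def Claim_equal_strategy_uncertainty_quota : Prop := ∀ (pool_cids : List Int) (pool_combined_score : List Int) (cluster_labels : List Int) (budget : Int) (max_per_cluster : Int), Dom_strategy_uncertainty_quota pool_cids pool_combined_score cluster_labels budget max_per_cluster → Pre_strategy_uncertainty_quota pool_cids pool_combined_score cluster_labels budget max_per_cluster → Spec_strategy_uncertainty_quota pool_cids pool_combined_score cluster_labels budget max_per_cluster (strategy_uncertainty_quota pool_cids pool_combined_score cluster_labels budget max_per_cluster)

-- ===== LEMMAS AND PROOFS =====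

-- ---------- generic utilities ----------

theorem pvSet_update_eq_self {s : PySem.Set Int} {l : List Int} (h : ∀ x ∈ l, x ∈ s) :
    PySem.Set.update s l = s := by
  induction l generalizing s with
  | nil => rfl
  | cons x t ih =>
    rw [PySem.Set.update_cons, PySem.Set.add_of_mem (h x (by simp))]
    exact ih fun y hy => h y (by simp [hy])

theorem pvGetD_foldl_modify_nodup {ν : Type} (ks : List Int) (f : ν → ν) (d0 : ν)
    (d : PySem.Dict Int ν) (h : ks.Nodup) (cl : Int) :
    (ks.foldl (fun d c => d.modify c d0 f) d).getD cl d0 =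
      if cl ∈ ks then f (d.getD cl d0) else d.getD cl d0 := by
  induction ks generalizing d with
  | nil => simp
  | cons c t ih =>
    simp only [List.foldl_cons]
    rcases List.nodup_cons.mp h with ⟨hc, ht⟩
    rw [ih _ ht]
    by_cases hcl : cl ∈ t
    · have : cl ≠ c := fun e => hc (e ▸ hcl)
      simp [hcl, PySem.Dict.getD_modify, this, List.mem_cons]
    · by_cases hec : cl = c
      · subst hec; simp [hcl, PySem.Dict.getD_modify]
      · simp [hcl, hec, PySem.Dict.getD_modify]

theorem pvGetD_foldl_insert_const {ν : Type} (v : ν) (ks : List Int) (cl : Int) :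
    (ks.foldl (fun d c => d.insert c v) PySem.Dict.empty).getD cl v = v := by
  have key : ∀ (ks : List Int) (d : PySem.Dict Int ν), (∀ x, d.getD x v = v) →
      (ks.foldl (fun d c => d.insert c v) d).getD cl v = v := by
    intro ks
    induction ks with
    | nil => intro d hd; exact hd cl
    | cons c t ih =>
      intro d hd
      simp only [List.foldl_cons]
      refine ih _ fun x => ?_
      rw [PySem.Dict.getD_insert]
      split <;> simp [hd]
  exact key ks _ fun x => by simp

-- ---------- stability of PySem.List.sorted on index lists ----------

-- strict tie-broken order: score, then original index
def pvLord (s : Int → Int) (a b : Int) : Prop := s a < s b ∨ (s a = s b ∧ a < b)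

theorem pvLord_unique {s : Int → Int} {l1 l2 : List Int} (hp : l1.Perm l2)
    (h1 : l1.Pairwise (pvLord s)) (h2 : l2.Pairwise (pvLord s)) : l1 = l2 := by
  refine List.Perm.eq_of_sorted (fun a b _ _ hab hba => ?_) h1 h2 hp
  rcases hab with h | ⟨_, h⟩ <;> rcases hba with h' | ⟨_, h'⟩ <;> omega

theorem pvInsertBy_stab {s : Int → Int} {x : Int} {acc : List Int}
    (hacc : acc.Pairwise (pvLord s)) (hlt : ∀ a ∈ acc, a < x) :
    (PySem.List.insertBy (fun a b => decide (s a < s b)) x acc).Pairwise (pvLord s) := by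
  induction acc with
  | nil => simp [PySem.List.insertBy.eq_1, pvLord]
  | cons y ys ih =>
    rw [PySem.List.insertBy.eq_2]
    rcases List.pairwise_cons.mp hacc with ⟨hy, hys⟩
    by_cases hlt' : s x < s y
    · simp only [hlt', decide_true, if_true]
      refine List.pairwise_cons.mpr ⟨?_, hacc⟩
      intro b hb
      rcases List.mem_cons.mp hb with rfl | hb
      · exact Or.inl hlt'
      · rcases hy b hb with h | ⟨h, h'⟩
        · exact Or.inl (lt_trans hlt' h)
        · exact Or.inl (h ▸ hlt')
    · simp only [hlt', decide_false, if_false]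
      refine List.pairwise_cons.mpr ⟨?_, ih hys (fun a ha => hlt a (List.mem_cons_of_mem _ ha))⟩
      intro b hb
      rcases (PySem.List.insertBy_mem_iff _ _ _ _).mp hb with rfl | hb
      · rcases lt_or_eq_of_le (not_lt.mp hlt') with h | h
        · exact Or.inl h
        · exact Or.inr ⟨h, hlt y (by simp)⟩
      · exact hy b hb

theorem pvSorted_stab {s : Int → Int} {xs : List Int} (hx : xs.Pairwise (· < ·)) :
    (PySem.List.sorted xs s false).Pairwise (pvLord s) := by
  rw [PySem.List.sorted_eq_foldl_insertBy]
  suffices key : ∀ (xs acc : List Int), acc.Pairwise (pvLord s) →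
      (∀ a ∈ acc, ∀ b ∈ xs, a < b) → xs.Pairwise (· < ·) →
      (xs.foldl (fun acc x => PySem.List.insertBy (fun a b => decide (s a < s b)) x acc) acc).Pairwise (pvLord s) by
    exact key xs [] (by simp) (by simp) hx
  intro xs
  induction xs with
  | nil => intro acc h _ _; simpa using h
  | cons x t ih =>
    intro acc hacc hcross hxs
    rcases List.pairwise_cons.mp hxs with ⟨hxt, ht⟩
    simp only [List.foldl_cons]
    refine ih _ (pvInsertBy_stab hacc (fun a ha => hcross a ha x (by simp))) ?_ ht
    intro a ha b hb
    rcases (PySem.List.insertBy_mem_iff _ _ _ _).mp ha with rfl | ha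
    · exact hxt b hb
    · exact hcross a ha b (List.mem_cons_of_mem _ hb)

-- ---------- sorted/map/congr commutation ----------

theorem pvInsertBy_map {α β : Type} (f : α → β) (b1 : α → α → Bool) (b2 : β → β → Bool)
    (x : α) (acc : List α) (h : ∀ y ∈ acc, b2 (f x) (f y) = b1 x y) :
    (PySem.List.insertBy b1 x acc).map f = PySem.List.insertBy b2 (f x) (acc.map f) := by
  induction acc with
  | nil => simp [PySem.List.insertBy.eq_1]
  | cons y ys ih =>
    rw [PySem.List.insertBy.eq_2, List.map_cons, PySem.List.insertBy.eq_2, h y (by simp)]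
    split
    · simp
    · simp only [List.map_cons]
      rw [ih (fun z hz => h z (List.mem_cons_of_mem _ hz))]

theorem pvSorted_map_comm (ks : List Int) (f : Int → List Int) (g : List Int → Int) :
    PySem.List.sorted (ks.map f) g false = (PySem.List.sorted ks (fun k => g (f k)) false).map f := by
  rw [PySem.List.sorted_eq_foldl_insertBy, PySem.List.sorted_eq_foldl_insertBy]
  suffices key : ∀ (ks : List Int) (acc : List Int),
      (ks.map f).foldl (fun acc y => PySem.List.insertBy (fun a b => decide (g a < g b)) y acc) (acc.map f) =
      (ks.foldl (fun acc k => PySem.List.insertBy (fun a b => decide (g (f a) < g (f b))) k acc) acc).map f by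
    simpa using key ks []
  intro ks
  induction ks with
  | nil => intro acc; simp
  | cons k t ih =>
    intro acc
    simp only [List.map_cons, List.foldl_cons]
    rw [← pvInsertBy_map f (fun a b => decide (g (f a) < g (f b))) (fun a b => decide (g a < g b)) k acc (fun y _ => rfl), ih]

theorem pvSorted_congr {xs : List Int} {k1 k2 : Int → Int} (h : ∀ x ∈ xs, k1 x = k2 x) :
    PySem.List.sorted xs k1 false = PySem.List.sorted xs k2 false := by
  rw [PySem.List.sorted_eq_foldl_insertBy, PySem.List.sorted_eq_foldl_insertBy]
  suffices key : ∀ (xs acc : List Int), (∀ x ∈ xs, k1 x = k2 x) → (∀ y ∈ acc, k1 y = k2 y) →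
      xs.foldl (fun acc x => PySem.List.insertBy (fun a b => decide (k1 a < k1 b)) x acc) acc =
      xs.foldl (fun acc x => PySem.List.insertBy (fun a b => decide (k2 a < k2 b)) x acc) acc by
    exact key xs [] h (by simp)
  intro xs
  induction xs with
  | nil => intro acc _ _; rfl
  | cons x t ih =>
    intro acc hxs hacc
    simp only [List.foldl_cons]
    have hins : PySem.List.insertBy (fun a b => decide (k1 a < k1 b)) x acc =
        PySem.List.insertBy (fun a b => decide (k2 a < k2 b)) x acc := by
      clear ih
      induction acc with
      | nil => rfl
      | cons y ys ih2 =>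
        rw [PySem.List.insertBy.eq_2, PySem.List.insertBy.eq_2,
          hxs x (by simp), hacc y (by simp)]
        split
        · rfl
        · rw [ih2 (fun z hz => hacc z (List.mem_cons_of_mem _ hz))]
    rw [hins]
    refine ih _ (fun z hz => hxs z (List.mem_cons_of_mem _ hz)) ?_
    intro y hy
    rcases (PySem.List.insertBy_mem_iff _ _ _ _).mp hy with rfl | hy
    · exact hxs y (by simp)
    · exact hacc y hy

-- ---------- cluster partition ----------

theorem pvPartition_perm (L : Int → Int) (co : List Int) (base : List Int)
    (hnd : co.Nodup) (hcov : ∀ i ∈ base, L i ∈ co) :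
    ((co.map (fun cl => base.filter (fun i => L i == cl))).flatten).Perm base := by
  induction co generalizing base with
  | nil =>
    have : base = [] := List.eq_nil_iff_forall_not_mem.mpr (fun x hx => by simpa using hcov x hx)
    simp [this]
  | cons c t ih =>
    rcases List.nodup_cons.mp hnd with ⟨hc, ht⟩
    simp only [List.map_cons, List.flatten_cons]
    have hfix : ∀ cl ∈ t, base.filter (fun i => L i == cl) =
        (base.filter (fun i => !(L i == c))).filter (fun i => L i == cl) := by
      intro cl hcl
      rw [List.filter_filter]
      refine (List.filter_congr ?_).symm
      intro i _
      have hclc : cl ≠ c := fun e => hc (e ▸ hcl)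
      by_cases h : L i = cl
      · simp [h, hclc]
      · simp [h]
    have hmaps : t.map (fun cl => base.filter (fun i => L i == cl)) =
        t.map (fun cl => (base.filter (fun i => !(L i == c))).filter (fun i => L i == cl)) :=
      List.map_congr_left hfix
    rw [hmaps]
    have hcov' : ∀ i ∈ base.filter (fun i => !(L i == c)), L i ∈ t := by
      intro i hi
      rcases List.mem_filter.mp hi with ⟨hib, hne⟩
      rcases List.mem_cons.mp (hcov i hib) with h | h
      · simp [h] at hne
      · exact h
    exact ((ih _ ht hcov').append_left _).trans (List.filter_append_perm _ base)


-- ---------- round-robin interleaving (common abstraction) ----------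

theorem pvSumLenTail_le (qs : List (List Int)) :
    ((qs.map List.tail).map List.length).sum ≤ (qs.map List.length).sum := by
  induction qs with
  | nil => simp
  | cons q t ih =>
    simp only [List.map_cons, List.sum_cons]
    have : q.tail.length ≤ q.length := by cases q <;> simp
    omega

theorem pvSumLenTail_lt {qs : List (List Int)} (h : ¬ (qs.all List.isEmpty = true)) :
    ((qs.map List.tail).map List.length).sum < (qs.map List.length).sum := by
  induction qs with
  | nil => simp at h
  | cons q t ih =>
    simp only [List.map_cons, List.sum_cons]
    by_cases hq : q.isEmpty
    · have ht : ¬ (t.all List.isEmpty = true) := by simp_all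
      have h1 : q.tail.length ≤ q.length := by cases q <;> simp
      have := ih ht
      omega
    · have h1 : q.tail.length < q.length := by
        cases q with
        | nil => simp at hq
        | cons a l => simp
      have := pvSumLenTail_le t
      omega

def pvRounds (qs : List (List Int)) : List Int :=
  if h : qs.all List.isEmpty = true then []
  else qs.filterMap List.head? ++ pvRounds (qs.map List.tail)
termination_by (qs.map List.length).sum
decreasing_by
  simpa using pvSumLenTail_lt h

theorem pvRounds_nil {qs : List (List Int)} (h : qs.all List.isEmpty = true) :
    pvRounds qs = [] := by unfold pvRounds; rw [dif_pos h]

theorem pvRounds_cons {qs : List (List Int)} (h : ¬ (qs.all List.isEmpty = true)) :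
    pvRounds qs = qs.filterMap List.head? ++ pvRounds (qs.map List.tail) := by
  conv_lhs => unfold pvRounds
  rw [dif_neg h]

theorem pvFlatten_perm_heads (qs : List (List Int)) :
    qs.flatten.Perm (qs.filterMap List.head? ++ (qs.map List.tail).flatten) := by
  induction qs with
  | nil => simp
  | cons q t ih =>
    cases q with
    | nil => simpa using ih
    | cons x xs =>
      simp only [List.flatten_cons, List.filterMap_cons, List.head?_cons, List.map_cons,
        List.tail_cons]
      refine (List.Perm.append_left _ ih).trans ?_
      simp only [List.cons_append]
      refine List.Perm.cons _ ?_
      exact (List.perm_append_comm_assoc _ _ _)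

theorem pvFlatten_nil_of_all_empty {qs : List (List Int)} (h : qs.all List.isEmpty = true) :
    qs.flatten = [] := by
  rw [List.flatten_eq_nil_iff]
  intro l hl
  have := List.all_eq_true.mp h l hl
  simpa using this

theorem pvHeads_nil_iff (qs : List (List Int)) :
    qs.filterMap List.head? = [] ↔ qs.all List.isEmpty = true := by
  induction qs with
  | nil => simp
  | cons q t ih => cases q <;> simp_all

-- ---------- preprocessing characterization ----------

def pvIdx (cids : List Int) : List Int := PySem.List.pyRange 0 (cids.length : Int) 1
def pvLab (labels : List Int) (i : Int) : Int := PySem.List.pyGetD labels i 0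
def pvSc (scores : List Int) (i : Int) : Int := PySem.List.pyGetD scores i 0
def pvBucketA (cids labels : List Int) (cl : Int) : List Int :=
  (pvIdx cids).filter (fun i => pvLab labels i == cl)
def pvBucketB (cids scores labels : List Int) (cl : Int) : List Int :=
  (Bby_score cids scores).filter (fun i => pvLab labels i == cl)
def pvKeys (cids labels : List Int) : List Int :=
  PySem.Set.ofList ((pvIdx cids).map (pvLab labels))
def pvQS (cids scores labels : List Int) : List (List Int) :=
  (Aco cids scores labels).map (fun cl => pvBucketB cids scores labels cl)

theorem pvGrouping (base : List Int) (L : Int → Int) (d : PySem.Dict Int (List Int))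
    (hd : ∀ cl, d.getD cl [] = []) (cl : Int) :
    (base.foldl (fun d i => d.modify (L i) [] (· ++ [i])) d).getD cl [] =
      base.filter (fun i => L i == cl) := by
  have h1 : List.foldl (fun (d : PySem.Dict Int (List Int)) (p : Int × Int) => d.modify p.1 [] (· ++ [p.2])) d
      (base.map (fun i => ((L i : Int), i))) =
      base.foldl (fun d i => d.modify (L i) [] (· ++ [i])) d := List.foldl_map
  rw [← h1, PySem.Dict.getD_foldl_modify_append, hd, List.filter_map, List.map_map]
  simp [Function.comp_def]

theorem pvAmem1_getD (cids labels : List Int) (cl : Int) :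
    (Amem1 cids labels).getD cl [] = pvBucketA cids labels cl := by
  unfold Amem1
  have h2 : List.foldl (fun (d : PySem.Dict Int (List Int)) (i : Int) => d.modify (PySem.List.pyGetD labels i 0) [] (· ++ [i]))
      PySem.Dict.empty ((PySem.List.enumerate cids 0).map (fun p : Int × Int => p.1)) =
      (PySem.List.enumerate cids 0).foldl
        (fun d p => d.modify (PySem.List.pyGetD labels p.1 0) [] (· ++ [p.1])) PySem.Dict.empty :=
    List.foldl_map
  rw [← h2, PySem.List.map_fst_enumerate]
  have h3 : PySem.List.pyRange 0 (0 + (cids.length : Int)) 1 = pvIdx cids := by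
    unfold pvIdx; norm_num
  rw [h3, pvGrouping _ _ _ (fun cl => by simp) cl]
  unfold pvBucketA pvLab
  rfl

theorem pvAmem1_keys (cids labels : List Int) :
    (Amem1 cids labels).keys = pvKeys cids labels := by
  unfold Amem1
  rw [PySem.Dict.keys_foldl_modify_key (PySem.List.enumerate cids 0)
    (fun p : Int × Int => PySem.List.pyGetD labels p.1 0) []
    (fun _ p => (· ++ [p.1])) PySem.Dict.empty]
  rw [show (PySem.Dict.empty : PySem.Dict Int (List Int)).keys = [] from rfl,
    PySem.Set.update_nil_left]
  unfold pvKeys pvLab pvIdx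
  congr 1
  have h4 : List.map (fun p : Int × Int => PySem.List.pyGetD labels p.1 0) (PySem.List.enumerate cids 0) =
      ((PySem.List.enumerate cids 0).map (fun p : Int × Int => p.1)).map
        (fun i => PySem.List.pyGetD labels i 0) := by
    rw [List.map_map]; rfl
  rw [h4, PySem.List.map_fst_enumerate]
  norm_num

theorem pvAmem2_keys (cids scores labels : List Int) :
    (Amem2 cids scores labels).keys = pvKeys cids labels := by
  unfold Amem2
  rw [PySem.Dict.keys_foldl_modify_key ((Amem1 cids labels).keys) (fun x : Int => x) []
    (fun _ _ => (fun ms => PySem.List.sorted ms (fun i => PySem.List.pyGetD scores i 0) false))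
    (Amem1 cids labels)]
  have hid : ((Amem1 cids labels).keys.map (fun x : Int => x)) = (Amem1 cids labels).keys := by
    simp
  rw [hid, pvSet_update_eq_self (fun x hx => hx)]
  exact pvAmem1_keys cids labels

theorem pvAmem2_getD (cids scores labels : List Int) (cl : Int) (h : cl ∈ pvKeys cids labels) :
    (Amem2 cids scores labels).getD cl [] =
      PySem.List.sorted (pvBucketA cids labels cl) (pvSc scores) false := by
  unfold Amem2
  rw [pvGetD_foldl_modify_nodup _ _ _ _ (by rw [pvAmem1_keys]; exact PySem.Set.nodup_ofList _) cl]
  rw [pvAmem1_keys, if_pos h, pvAmem1_getD]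
  unfold pvSc
  rfl

theorem pvStab_bucket (cids scores labels : List Int) (cl : Int) :
    PySem.List.sorted (pvBucketA cids labels cl) (pvSc scores) false =
      pvBucketB cids scores labels cl := by
  have hA : (pvBucketA cids labels cl).Pairwise (· < ·) :=
    (PySem.List.pairwise_lt_pyRange_one 0 (cids.length : Int)).filter _
  have h1 := pvSorted_stab (s := pvSc scores) hA
  have h2 : (pvBucketB cids scores labels cl).Pairwise (pvLord (pvSc scores)) := by
    unfold pvBucketB Bby_score
    exact (pvSorted_stab (s := pvSc scores)
      (PySem.List.pairwise_lt_pyRange_one 0 (cids.length : Int))).filter _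
  refine pvLord_unique ?_ h1 h2
  refine (PySem.List.sorted_perm _ _ _).trans ?_
  unfold pvBucketA pvBucketB Bby_score pvIdx
  exact (List.Perm.filter _ (PySem.List.sorted_perm _ _ _)).symm

theorem pvBbuckets_getD (cids scores labels : List Int) (cl : Int) :
    (Bbuckets cids scores labels).getD cl [] = pvBucketB cids scores labels cl := by
  unfold Bbuckets
  rw [pvGrouping _ _ _ (fun cl => pvGetD_foldl_insert_const [] _ cl) cl]
  unfold pvBucketB pvLab
  rfl

theorem pvRangeMap_take (l : List Int) (n : Nat) (h : n ≤ l.length) :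
    (List.range n).map (fun k => l.getD k 0) = l.take n := by
  induction n with
  | zero => simp
  | succ m ih =>
    rw [List.range_succ, List.map_append, ih (by omega), List.take_succ]
    have hm : m < l.length := by omega
    simp [List.getElem?_eq_getElem hm, List.getD]

theorem pvMap_lab_idx (cids labels : List Int) (h : cids.length ≤ labels.length) :
    (pvIdx cids).map (pvLab labels) = labels.take cids.length := by
  unfold pvIdx pvLab
  rw [PySem.List.pyRange_one, List.map_map]
  have h0 : ((cids.length : Int) - 0).toNat = cids.length := by omega
  rw [h0]
  rw [← pvRangeMap_take labels cids.length h]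
  refine List.map_congr_left fun k hk => ?_
  simp [Function.comp_def]

theorem pvBbuckets_keys (cids scores labels : List Int) (h : cids.length ≤ labels.length) :
    (Bbuckets cids scores labels).keys = pvKeys cids labels := by
  unfold Bbuckets
  rw [PySem.Dict.keys_foldl_modify_key (Bby_score cids scores)
    (fun i : Int => PySem.List.pyGetD labels i 0) []
    (fun _ i => (· ++ [i])) _]
  rw [PySem.Dict.keys_foldl_insert]
  rw [show (PySem.Dict.empty : PySem.Dict Int (List Int)).keys = [] from rfl,
    PySem.Set.update_nil_left, PySem.List.dedup_eq_ofList, PySem.Set.ofList_ofList]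
  rw [PySem.List.slice_to_natCast]
  rw [pvSet_update_eq_self]
  · unfold pvKeys
    rw [pvMap_lab_idx cids labels h]
  · intro x hx
    rcases List.mem_map.mp hx with ⟨i, hi, rfl⟩
    have hidx : i ∈ pvIdx cids := by
      unfold Bby_score at hi
      exact (PySem.List.sorted_perm _ _ _).mem_iff.mp hi
    rw [PySem.Set.mem_ofList]
    have : PySem.List.pyGetD labels i 0 ∈ (pvIdx cids).map (pvLab labels) :=
      List.mem_map.mpr ⟨i, hidx, rfl⟩
    rwa [pvMap_lab_idx cids labels h] at this

theorem pvAco_perm (cids scores labels : List Int) :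
    (Aco cids scores labels).Perm (pvKeys cids labels) := by
  unfold Aco
  rw [pvAmem2_keys]
  exact PySem.List.sorted_perm _ _ _

theorem pvAco_nodup (cids scores labels : List Int) : (Aco cids scores labels).Nodup :=
  ((pvAco_perm cids scores labels).nodup_iff).mpr (PySem.Set.nodup_ofList _)

theorem pvA_qs (cids scores labels : List Int) :
    (Aco cids scores labels).map (fun cl => (Amem2 cids scores labels).getD cl []) =
      pvQS cids scores labels := by
  refine List.map_congr_left fun cl hcl => ?_
  have hk : cl ∈ pvKeys cids labels := (pvAco_perm cids scores labels).mem_iff.mp hcl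
  rw [pvAmem2_getD cids scores labels cl hk, pvStab_bucket]

theorem pvB_queues (cids scores labels : List Int) (h : cids.length ≤ labels.length) :
    Bqueues cids scores labels = pvQS cids scores labels := by
  unfold Bqueues
  rw [PySem.Dict.values_eq_map_keys _ (by rw [pvBbuckets_keys cids scores labels h]; exact PySem.Set.nodup_ofList _) [],
    pvBbuckets_keys cids scores labels h]
  rw [List.map_congr_left (fun cl _ => pvBbuckets_getD cids scores labels cl)]
  rw [pvSorted_map_comm (pvKeys cids labels) (fun cl => pvBucketB cids scores labels cl)
    (fun q => PySem.List.pyGetD scores (PySem.List.pyGetD q 0 0) 0)]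
  unfold pvQS Aco
  rw [pvAmem2_keys]
  congr 1
  refine pvSorted_congr fun cl hcl => ?_
  rw [pvAmem2_getD cids scores labels cl hcl, pvStab_bucket]

theorem pvQS_flatten_perm (cids scores labels : List Int) :
    (pvQS cids scores labels).flatten.Perm (pvIdx cids) := by
  have hcov : ∀ i ∈ Bby_score cids scores, pvLab labels i ∈ Aco cids scores labels := by
    intro i hi
    have hidx : i ∈ pvIdx cids := by
      unfold Bby_score at hi
      exact (PySem.List.sorted_perm _ _ _).mem_iff.mp hi
    refine (pvAco_perm cids scores labels).mem_iff.mpr ?_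
    exact PySem.Set.mem_ofList _ _ |>.mpr (List.mem_map.mpr ⟨i, hidx, rfl⟩)
  have := pvPartition_perm (pvLab labels) (Aco cids scores labels) (Bby_score cids scores)
    (pvAco_nodup cids scores labels) hcov
  refine ?_
  unfold pvQS pvBucketB
  refine this.trans ?_
  unfold Bby_score pvIdx
  exact PySem.List.sorted_perm _ _ _

theorem pvQS_nonempty (cids scores labels : List Int) :
    ∀ q ∈ pvQS cids scores labels, q ≠ [] := by
  intro q hq
  rcases List.mem_map.mp hq with ⟨cl, hcl, rfl⟩
  have hk : cl ∈ pvKeys cids labels := (pvAco_perm cids scores labels).mem_iff.mp hcl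
  rcases List.mem_map.mp ((PySem.Set.mem_ofList _ _).mp hk) with ⟨i, hi, rfl⟩
  have hib : i ∈ Bby_score cids scores := by
    unfold Bby_score
    exact (PySem.List.sorted_perm _ _ _).mem_iff.mpr hi
  have : i ∈ pvBucketB cids scores labels (pvLab labels i) :=
    List.mem_filter.mpr ⟨hib, by simp⟩
  exact fun he => by simp [he] at this


-- ---------- A-side loop analysis ----------

def pvHeads (mem : PySem.Dict Int (List Int)) (e : Nat) (cls : List Int) : List Int :=
  cls.filterMap (fun cl => ((mem.getD cl []).drop e).head?)

theorem pvHeads_eq (mem : PySem.Dict Int (List Int)) (e : Nat) (cls : List Int) :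
    pvHeads mem e cls = (cls.map (fun cl => (mem.getD cl []).drop e)).filterMap List.head? := by
  unfold pvHeads
  rw [List.filterMap_map]
  rfl

theorem pvInnerScan_exhausted (fuel : Nat) (members : List Int) (ptr : Int) (s : List Int)
    (h : (members.length : Int) ≤ ptr) : AinnerScan fuel members ptr s = (ptr, none) := by
  cases fuel with
  | zero => rfl
  | succ m => simp [AinnerScan, not_lt.mpr h]

theorem pvInnerScan_pick (members : List Int) (e : Nat) (s : List Int)
    (he : e < members.length) (hs : members[e] ∉ s) :
    AinnerScan members.length members (e : Int) s = ((e : Int) + 1, some members[e]) := by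
  obtain ⟨m, hm⟩ : ∃ m, members.length = m + 1 := ⟨members.length - 1, by omega⟩
  rw [hm]
  have hlt : (e : Int) < (members.length : Int) := by exact_mod_cast he
  have hget : PySem.List.pyGetD members (e : Int) 0 = members[e] := by
    simp [PySem.List.pyGetD_natCast, List.getD_eq_getElem?_getD, List.getElem?_eq_getElem he]
  rw [hm] at hlt
  simp only [AinnerScan, hget]
  rw [← hm] at hlt
  simp [hlt, hs]

theorem pvApass_blocked (mem : PySem.Dict Int (List Int)) (budget cap : Int) (e : Nat)
    (cls : List Int) (st : AState)
    (hcap : ∀ cl ∈ cls, ((min e (mem.getD cl []).length : Nat) : Int) ≥ cap ∨ (mem.getD cl []).length ≤ e)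
    (hptr : ∀ cl ∈ cls, st.pointer.getD cl 0 = ((min e (mem.getD cl []).length : Nat) : Int))
    (hpick : ∀ cl ∈ cls, st.picked.getD cl 0 = ((min e (mem.getD cl []).length : Nat) : Int)) :
    (ApassA mem budget cap cls st).sel = st.sel ∧
    (ApassA mem budget cap cls st).selSet = st.selSet ∧
    (ApassA mem budget cap cls st).picked = st.picked ∧
    (ApassA mem budget cap cls st).progress = st.progress ∧
    ∀ cl, (ApassA mem budget cap cls st).pointer.getD cl 0 = st.pointer.getD cl 0 := by
  induction cls generalizing st with
  | nil => exact ⟨rfl, rfl, rfl, rfl, fun _ => rfl⟩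
  | cons cl rest ih =>
    simp only [ApassA]
    by_cases hb : (st.sel.length : Int) ≥ budget
    · rw [if_pos hb]
      exact ⟨rfl, rfl, rfl, rfl, fun _ => rfl⟩
    · rw [if_neg hb]
      by_cases hc : st.picked.getD cl 0 ≥ cap
      · rw [if_pos hc]
        exact ih st (fun c hcc => hcap c (List.mem_cons_of_mem _ hcc))
          (fun c hcc => hptr c (List.mem_cons_of_mem _ hcc))
          (fun c hcc => hpick c (List.mem_cons_of_mem _ hcc))
      · rw [if_neg hc]
        have hlen : (mem.getD cl []).length ≤ e := by
          rcases hcap cl (List.mem_cons_self ..) with h | h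
          · exact absurd (hpick cl (List.mem_cons_self ..) ▸ h) hc
          · exact h
        have hmin : min e (mem.getD cl []).length = (mem.getD cl []).length := by omega
        have hscan : AinnerScan (mem.getD cl []).length (mem.getD cl [])
            (st.pointer.getD cl 0) st.selSet = (st.pointer.getD cl 0, none) := by
          refine pvInnerScan_exhausted _ _ _ _ ?_
          rw [hptr cl (List.mem_cons_self ..), hmin]
        rw [hscan]
        have hptr' : ∀ c, (st.pointer.insert cl (st.pointer.getD cl 0)).getD c 0 =
            st.pointer.getD c 0 := by
          intro c
          rw [PySem.Dict.getD_insert]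
          split
          · next hcc => rw [hcc]
          · rfl
        obtain ⟨h1, h2, h3, h4, h5⟩ := ih { st with pointer := st.pointer.insert cl (st.pointer.getD cl 0) }
          (fun c hcc => hcap c (List.mem_cons_of_mem _ hcc))
          (fun c hcc => by
            show (st.pointer.insert cl (st.pointer.getD cl 0)).getD c 0 = _
            rw [hptr' c]; exact hptr c (List.mem_cons_of_mem _ hcc))
          (fun c hcc => hpick c (List.mem_cons_of_mem _ hcc))
        exact ⟨h1, h2, h3, h4, fun c => (h5 c).trans (hptr' c)⟩

theorem pvApass_run (mem : PySem.Dict Int (List Int)) (budget cap : Int) (e : Nat)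
    (cls : List Int) (st : AState)
    (hnd : cls.Nodup)
    (hcap : (e : Int) < cap)
    (hptr : ∀ cl ∈ cls, st.pointer.getD cl 0 = ((min e (mem.getD cl []).length : Nat) : Int))
    (hpick : ∀ cl ∈ cls, st.picked.getD cl 0 = ((min e (mem.getD cl []).length : Nat) : Int))
    (hdisj : ∀ cl ∈ cls, ∀ x ∈ (mem.getD cl []).drop e, x ∉ st.selSet)
    (hflat : (cls.map (fun cl => (mem.getD cl []).drop e)).flatten.Nodup) :
    (ApassA mem budget cap cls st).sel =
        st.sel ++ (pvHeads mem e cls).take (budget - st.sel.length).toNat ∧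
    (∀ x ∈ (ApassA mem budget cap cls st).selSet, x ∈ st.selSet ∨ x ∈ pvHeads mem e cls) ∧
    ((st.sel.length : Int) + (pvHeads mem e cls).length < budget →
      (∀ cl ∈ cls,
        (ApassA mem budget cap cls st).pointer.getD cl 0 = ((min (e+1) (mem.getD cl []).length : Nat) : Int) ∧
        (ApassA mem budget cap cls st).picked.getD cl 0 = ((min (e+1) (mem.getD cl []).length : Nat) : Int)) ∧
      (∀ cl', cl' ∉ cls →
        (ApassA mem budget cap cls st).pointer.getD cl' 0 = st.pointer.getD cl' 0 ∧
        (ApassA mem budget cap cls st).picked.getD cl' 0 = st.picked.getD cl' 0) ∧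
      (∀ cl ∈ cls, ∀ x ∈ (mem.getD cl []).drop (e+1), x ∉ (ApassA mem budget cap cls st).selSet) ∧
      (ApassA mem budget cap cls st).progress = (st.progress || !(pvHeads mem e cls).isEmpty)) := by
  induction cls generalizing st with
  | nil =>
    refine ⟨by simp [ApassA, pvHeads], fun x hx => Or.inl hx, fun _ => ?_⟩
    refine ⟨by simp, fun cl' _ => ⟨rfl, rfl⟩, by simp [ApassA], ?_⟩
    simp [pvHeads, ApassA]
  | cons cl rest ih =>
    rcases List.nodup_cons.mp hnd with ⟨hclr, hndr⟩
    simp only [ApassA]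
    by_cases hb : (st.sel.length : Int) ≥ budget
    · rw [if_pos hb]
      have ht : (budget - (st.sel.length : Int)).toNat = 0 := by omega
      refine ⟨by simp [ht], fun x hx => Or.inl hx, fun hfull => absurd hfull (by push_cast; omega)⟩
    · rw [if_neg hb]
      have hpc : ¬ (st.picked.getD cl 0 ≥ cap) := by
        rw [hpick cl (List.mem_cons_self ..)]
        have : ((min e (mem.getD cl []).length : Nat) : Int) ≤ (e : Int) := by
          push_cast; omega
        omega
      rw [if_neg hpc]
      by_cases hlen : (mem.getD cl []).length ≤ e
      · -- cluster already exhausted: inner scan moves nothing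
        have hmin : min e (mem.getD cl []).length = (mem.getD cl []).length := by omega
        have hscan : AinnerScan (mem.getD cl []).length (mem.getD cl [])
            (st.pointer.getD cl 0) st.selSet = (st.pointer.getD cl 0, none) := by
          refine pvInnerScan_exhausted _ _ _ _ ?_
          rw [hptr cl (List.mem_cons_self ..), hmin]
        rw [hscan]
        have hdropnil : (mem.getD cl []).drop e = [] := List.drop_eq_nil_of_le hlen
        have hheads : pvHeads mem e (cl :: rest) = pvHeads mem e rest := by
          unfold pvHeads
          rw [List.filterMap_cons, hdropnil]
          rfl
        have hptr' : ∀ c, (st.pointer.insert cl (st.pointer.getD cl 0)).getD c 0 =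
            st.pointer.getD c 0 := by
          intro c
          rw [PySem.Dict.getD_insert]
          split
          · next hcc => rw [hcc]
          · rfl
        set st' : AState := { st with pointer := st.pointer.insert cl (st.pointer.getD cl 0) } with hst'
        have hflat' : (rest.map (fun c => (mem.getD c []).drop e)).flatten.Nodup := by
          simpa [hdropnil] using hflat
        obtain ⟨ih1, ih2, ih3⟩ := ih st' hndr
          (fun c hcc => (hptr' c).trans (hptr c (List.mem_cons_of_mem _ hcc)))
          (fun c hcc => hpick c (List.mem_cons_of_mem _ hcc))
          (fun c hcc => hdisj c (List.mem_cons_of_mem _ hcc))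
          hflat'
        refine ⟨by rw [ih1, hheads], fun x hx => by
          rcases ih2 x hx with h | h
          · exact Or.inl h
          · exact Or.inr (hheads ▸ h), fun hfull => ?_⟩
        rw [hheads] at hfull ⊢
        obtain ⟨p1, p2, p3, p4⟩ := ih3 hfull
        refine ⟨?_, ?_, ?_, p4⟩
        · intro c hcc
          rcases List.mem_cons.mp hcc with rfl | hcc
          · have hmin1 : min (e+1) (mem.getD c []).length = (mem.getD c []).length := by omega
            obtain ⟨pp, pk⟩ := p2 c hclr
            constructor
            · rw [pp, hptr' c, hptr c (List.mem_cons_self ..), hmin, hmin1]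
            · rw [pk]
              show st.picked.getD c 0 = _
              rw [hpick c (List.mem_cons_self ..), hmin, hmin1]
          · exact p1 c hcc
        · intro c' hc'
          have hc'r : c' ∉ rest := fun hh => hc' (List.mem_cons_of_mem _ hh)
          obtain ⟨pp, pk⟩ := p2 c' hc'r
          exact ⟨(pp.trans (hptr' c')), pk⟩
        · intro c hcc
          rcases List.mem_cons.mp hcc with rfl | hcc
          · intro x hx
            have : (mem.getD c []).drop (e+1) = [] := List.drop_eq_nil_of_le (by omega)
            simp [this] at hx
          · exact p3 c hcc
      · -- cluster has a member at round e: it is picked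
        push_neg at hlen
        have hmin : min e (mem.getD cl []).length = e := by omega
        have hdrop : (mem.getD cl []).drop e = (mem.getD cl [])[e] :: (mem.getD cl []).drop (e+1) :=
          List.drop_eq_getElem_cons hlen
        have hmemidx : (mem.getD cl [])[e] ∈ (mem.getD cl []).drop e := by
          rw [hdrop]; exact List.mem_cons_self ..
        have hnotin : (mem.getD cl [])[e] ∉ st.selSet :=
          hdisj cl (List.mem_cons_self ..) _ hmemidx
        have hscan : AinnerScan (mem.getD cl []).length (mem.getD cl [])
            (st.pointer.getD cl 0) st.selSet =
            ((e : Int) + 1, some ((mem.getD cl [])[e])) := by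
          rw [hptr cl (List.mem_cons_self ..), hmin]
          exact pvInnerScan_pick _ e _ hlen hnotin
        rw [hscan]
        have hheads : pvHeads mem e (cl :: rest) =
            (mem.getD cl [])[e] :: pvHeads mem e rest := by
          unfold pvHeads
          rw [List.filterMap_cons, hdrop]
          rfl
        set idx := (mem.getD cl [])[e] with hidx
        set st' : AState :=
          { sel := st.sel ++ [idx], selSet := PySem.Set.add st.selSet idx,
            picked := st.picked.modify cl 0 (· + 1),
            pointer := st.pointer.insert cl ((e : Int) + 1), progress := true } with hst'
        -- nodup decomposition of the flattened remainder
        have hflatc : ((mem.getD cl []).drop e ++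
            (rest.map (fun c => (mem.getD c []).drop e)).flatten).Nodup := by
          simpa using hflat
        have hpieceNd := (List.nodup_append.mp hflatc).1
        have hrestNd := (List.nodup_append.mp hflatc).2.1
        have hdisjoint := (List.nodup_append.mp hflatc).2.2
        obtain ⟨ih1, ih2, ih3⟩ := ih st' hndr
          (fun c hcc => by
            show (st.pointer.insert cl ((e : Int) + 1)).getD c 0 = _
            rw [PySem.Dict.getD_insert, if_neg (fun hh => hclr (by rw [hh] at hcc; exact hcc))]
            exact hptr c (List.mem_cons_of_mem _ hcc))
          (fun c hcc => by
            show (st.picked.modify cl 0 (· + 1)).getD c 0 = _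
            rw [PySem.Dict.getD_modify, if_neg (fun hh => hclr (by rw [hh] at hcc; exact hcc))]
            exact hpick c (List.mem_cons_of_mem _ hcc))
          (fun c hcc x hx => by
            show x ∉ PySem.Set.add st.selSet idx
            rw [PySem.Set.mem_add]
            rintro (h | rfl)
            · exact hdisj c (List.mem_cons_of_mem _ hcc) x hx h
            · exact hdisjoint idx hmemidx idx (List.mem_flatten.mpr
                ⟨(fun c => (mem.getD c []).drop e) c,
                  List.mem_map_of_mem (f := fun c => (mem.getD c []).drop e) hcc, hx⟩) rfl)
          hrestNd
        have hlen1 : (st'.sel.length : Int) = (st.sel.length : Int) + 1 := by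
          simp [hst']
        refine ⟨?_, ?_, ?_⟩
        · rw [ih1, hheads]
          have harith : (budget - (st.sel.length : Int)).toNat =
              (budget - ((st.sel.length : Int) + 1)).toNat + 1 := by omega
          rw [harith, List.take_succ_cons]
          simp [hst', List.append_assoc]
        · intro x hx
          rcases ih2 x hx with h | h
          · rcases (PySem.Set.mem_add _ _ _).mp h with h | rfl
            · exact Or.inl h
            · exact Or.inr (hheads ▸ List.mem_cons_self ..)
          · exact Or.inr (hheads ▸ List.mem_cons_of_mem _ h)
        · intro hfull
          rw [hheads] at hfull
          have hfull' : (st'.sel.length : Int) + ((pvHeads mem e rest).length : Int) < budget := by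
            rw [hlen1]
            simp only [List.length_cons] at hfull
            push_cast at hfull ⊢
            omega
          obtain ⟨p1, p2, p3, p4⟩ := ih3 hfull'
          refine ⟨?_, ?_, ?_, ?_⟩
          · intro c hcc
            rcases List.mem_cons.mp hcc with rfl | hcc
            · obtain ⟨pp, pk⟩ := p2 c hclr
              have hmin1 : (min (e+1) (mem.getD c []).length) = e + 1 := by omega
              constructor
              · rw [pp]
                show (st.pointer.insert c ((e : Int) + 1)).getD c 0 = _
                rw [PySem.Dict.getD_insert, if_pos rfl, hmin1]
                push_cast; ring
              · rw [pk]
                show (st.picked.modify c 0 (· + 1)).getD c 0 = _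
                rw [PySem.Dict.getD_modify, if_pos rfl, hpick c (List.mem_cons_self ..), hmin, hmin1]
                push_cast; ring
            · exact p1 c hcc
          · intro c' hc'
            have hc'r : c' ∉ rest := fun hh => hc' (List.mem_cons_of_mem _ hh)
            have hc'cl : c' ≠ cl := fun hh => hc' (hh ▸ List.mem_cons_self ..)
            obtain ⟨pp, pk⟩ := p2 c' hc'r
            constructor
            · rw [pp]
              show (st.pointer.insert cl ((e : Int) + 1)).getD c' 0 = _
              rw [PySem.Dict.getD_insert, if_neg hc'cl]
            · rw [pk]
              show (st.picked.modify cl 0 (· + 1)).getD c' 0 = _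
              rw [PySem.Dict.getD_modify, if_neg hc'cl]
          · intro c hcc x hx
            rcases List.mem_cons.mp hcc with rfl | hcc
            · intro hmem
              rcases ih2 x hmem with h | h
              · rcases (PySem.Set.mem_add _ _ _).mp h with h | rfl
                · exact hdisj c (List.mem_cons_self ..) x
                    (hdrop ▸ List.mem_cons_of_mem _ hx) h
                · rw [hdrop] at hpieceNd
                  exact (List.nodup_cons.mp hpieceNd).1 hx
              · -- x is a head of some other cluster, contradicting disjointness
                rw [pvHeads_eq] at h
                rcases List.mem_filterMap.mp h with ⟨piece, hpm, hph⟩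
                refine hdisjoint x ?_ x
                  (List.mem_flatten.mpr ⟨piece, hpm, List.mem_of_mem_head? hph⟩) rfl
                rw [hdrop]
                exact List.mem_cons_of_mem _ hx
            · exact p3 c hcc x hx
          · rw [p4, hheads]
            simp [hst']

theorem pvAloop (mem : PySem.Dict Int (List Int)) (co : List Int) (budget : Int)
    (hndco : co.Nodup) :
    ∀ (fuel : Nat) (e : Nat) (cap : Int) (st : AState),
    (∀ cl ∈ co, st.pointer.getD cl 0 = ((min e (mem.getD cl []).length : Nat) : Int)) →
    (∀ cl ∈ co, st.picked.getD cl 0 = ((min e (mem.getD cl []).length : Nat) : Int)) →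
    (∀ cl ∈ co, ∀ x ∈ (mem.getD cl []).drop e, x ∉ st.selSet) →
    (co.map (fun cl => (mem.getD cl []).drop e)).flatten.Nodup →
    (st.sel.length : Int) ≤ budget →
    budget ≤ (st.sel.length : Int) + ((co.map (fun cl => (mem.getD cl []).drop e)).flatten.length : Int) →
    2 * (budget - st.sel.length).toNat + ((e : Int) + 1 - cap).toNat + 1 ≤ fuel →
    AloopA mem co budget fuel cap st =
      st.sel ++ (pvRounds (co.map (fun cl => (mem.getD cl []).drop e))).take (budget - st.sel.length).toNat := by
  intro fuel
  induction fuel with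
  | zero =>
    intro e cap st _ _ _ _ _ _ hfuel
    omega
  | succ f ih =>
    intro e cap st hptr hpick hdisj hflat hselle hbud hfuel
    simp only [AloopA]
    by_cases hs : (st.sel.length : Int) < budget
    swap
    · rw [if_neg hs]
      have ht : (budget - (st.sel.length : Int)).toNat = 0 := by omega
      simp [ht]
    rw [if_pos hs]
    have hsel0 : ({ st with progress := false } : AState).sel = st.sel := rfl
    by_cases hcap : (e : Int) < cap
    · -- working pass
      obtain ⟨r1, r2, r3⟩ := pvApass_run mem budget cap e co { st with progress := false }
        hndco hcap hptr hpick hdisj hflat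
      have hheadsne : pvHeads mem e co ≠ [] := by
        intro hh
        have hall : (co.map (fun cl => (mem.getD cl []).drop e)).all List.isEmpty = true := by
          rw [← pvHeads_nil_iff, ← pvHeads_eq]
          exact hh
        have hfl : (co.map (fun cl => (mem.getD cl []).drop e)).flatten = [] :=
          pvFlatten_nil_of_all_empty hall
        rw [hfl] at hbud
        simp at hbud
        omega
      have hnall : ¬ ((co.map (fun cl => (mem.getD cl []).drop e)).all List.isEmpty = true) := by
        rw [← pvHeads_nil_iff, ← pvHeads_eq]
        exact hheadsne
      have htails : (co.map (fun cl => (mem.getD cl []).drop e)).map List.tail =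
          co.map (fun cl => (mem.getD cl []).drop (e+1)) := by
        simp [List.map_map, Function.comp_def, List.tail_drop]
      have hro : pvRounds (co.map (fun cl => (mem.getD cl []).drop e)) =
          pvHeads mem e co ++ pvRounds (co.map (fun cl => (mem.getD cl []).drop (e+1))) := by
        rw [pvRounds_cons hnall, ← pvHeads_eq, htails]
      have hlensplit : ((co.map (fun cl => (mem.getD cl []).drop e)).flatten).length =
          (pvHeads mem e co).length +
            ((co.map (fun cl => (mem.getD cl []).drop (e+1))).flatten).length := by
        have := (pvFlatten_perm_heads (co.map (fun cl => (mem.getD cl []).drop e))).length_eq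
        rw [htails, ← pvHeads_eq] at this
        simpa using this
      by_cases hfull : (st.sel.length : Int) + ((pvHeads mem e co).length : Int) < budget
      · obtain ⟨p1, p2, p3, p4⟩ := r3 hfull
        have hprog : (ApassA mem budget cap co { st with progress := false }).progress = true := by
          rw [p4]
          simp [List.isEmpty_eq_false_iff.mpr hheadsne]
        rw [hprog, if_pos rfl]
        have hrsel : (ApassA mem budget cap co { st with progress := false }).sel =
            st.sel ++ pvHeads mem e co := by
          rw [r1, hsel0]
          congr 1
          refine List.take_of_length_le ?_
          omega
        have hlen' : ((ApassA mem budget cap co { st with progress := false }).sel.length : Int) =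
            (st.sel.length : Int) + (pvHeads mem e co).length := by
          rw [hrsel]
          push_cast [List.length_append]
          ring
        rw [ih (e+1) cap _ (fun cl hcl => (p1 cl hcl).1) (fun cl hcl => (p1 cl hcl).2) p3
          ?flat ?selle ?bud ?fuel]
        case flat =>
          have hperm := pvFlatten_perm_heads (co.map (fun cl => (mem.getD cl []).drop e))
          rw [htails, ← pvHeads_eq] at hperm
          exact (List.nodup_append.mp (hperm.nodup_iff.mp hflat)).2.1
        case selle => rw [hlen']; omega
        case bud =>
          rw [hlen']
          rw [hlensplit] at hbud
          push_cast at hbud ⊢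
          omega
        case fuel =>
          rw [hlen']
          have h1 : 1 ≤ (pvHeads mem e co).length := by
            cases hh : pvHeads mem e co with
            | nil => exact absurd hh hheadsne
            | cons a l => simp
          push_cast at hfuel ⊢
          omega
        rw [hrsel, hro]
        have hle : (pvHeads mem e co).length ≤ (budget - (st.sel.length : Int)).toNat := by omega
        rw [List.take_append, List.take_of_length_le hle, List.append_assoc]
        congr 3
        push_cast [List.length_append]
        omega
      · -- budget reached inside this pass
        have ht : (budget - (st.sel.length : Int)).toNat ≤ (pvHeads mem e co).length := by omega
        have hrlen : ((ApassA mem budget cap co { st with progress := false }).sel.length : Int) =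
            budget := by
          rw [r1, hsel0]
          push_cast [List.length_append, List.length_take]
          omega
        obtain ⟨f', rfl⟩ : ∃ f', f = f' + 1 := ⟨f - 1, by omega⟩
        have hstep : ∀ cap', AloopA mem co budget (f' + 1) cap'
            (ApassA mem budget cap co { st with progress := false }) =
            (ApassA mem budget cap co { st with progress := false }).sel := by
          intro cap'
          simp only [AloopA]
          rw [if_neg (by omega)]
        have hfinal : (ApassA mem budget cap co { st with progress := false }).sel =
            st.sel ++ (pvRounds (co.map (fun cl => (mem.getD cl []).drop e))).take
              (budget - (st.sel.length : Int)).toNat := by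
          rw [r1, hsel0, hro, List.take_append]
          have hz : ((budget - (st.sel.length : Int)).toNat - (pvHeads mem e co).length) = 0 := by
            omega
          rw [hz]
          simp
        by_cases hpr : (ApassA mem budget cap co { st with progress := false }).progress = true
        · rw [hpr, if_pos rfl, hstep, hfinal]
        · rw [if_neg (by simpa using hpr), hstep, hfinal]
    · -- blocked pass: quota bump
      have hcapcl : ∀ cl ∈ co, ((min e (mem.getD cl []).length : Nat) : Int) ≥ cap ∨
          (mem.getD cl []).length ≤ e := by
        intro cl _
        by_cases h : (mem.getD cl []).length ≤ e
        · exact Or.inr h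
        · left
          have hm : min e (mem.getD cl []).length = e := by omega
          rw [hm]
          omega
      obtain ⟨b1, b2, b3, b4, b5⟩ := pvApass_blocked mem budget cap e co { st with progress := false }
        hcapcl hptr hpick
      have hprog : (ApassA mem budget cap co { st with progress := false }).progress = false := b4
      rw [hprog]
      simp only [Bool.false_eq_true, if_false]
      rw [ih e (cap + 1) _ (fun cl hcl => (b5 cl).trans (hptr cl hcl))
        (fun cl hcl => by rw [b3]; exact hpick cl hcl)
        (fun cl hcl x hx => by rw [b2]; exact hdisj cl hcl x hx)
        hflat (by rw [b1, hsel0]; exact hselle) (by rw [b1, hsel0]; exact hbud)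
        (by rw [b1, hsel0]; push_cast at hfuel ⊢; omega)]
      rw [b1, hsel0]

-- ---------- B-side loop analysis ----------

theorem pvBpass (budget : Int) (kn : Nat) (active : List (List Int)) (picks : List Int)
    (nxt : List (List Int)) (hne : ∀ q ∈ active, kn < q.length) :
    (Bpass budget (kn : Int) active picks nxt).1 =
        picks ++ ((active.map (fun q => q.drop kn)).filterMap List.head?).take (budget - picks.length).toNat ∧
    ((picks.length : Int) + ((active.map (fun q => q.drop kn)).filterMap List.head?).length < budget →
      (Bpass budget (kn : Int) active picks nxt).2 =
        nxt ++ active.filter (fun q => ((kn : Int) + 1 < (q.length : Int) : Bool))) := by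
  induction active generalizing picks nxt with
  | nil => exact ⟨by simp [Bpass], fun _ => by simp [Bpass]⟩
  | cons q rest ih =>
    have hq : kn < q.length := hne q (List.mem_cons_self ..)
    have hd : (q.drop kn).head? = some q[kn] := by
      rw [List.head?_drop]
      exact List.getElem?_eq_getElem hq
    have hheads : ((q :: rest).map (fun q => q.drop kn)).filterMap List.head? =
        q[kn] :: (rest.map (fun q => q.drop kn)).filterMap List.head? := by
      rw [List.map_cons, List.filterMap_cons, hd]
    simp only [Bpass]
    by_cases hb : (picks.length : Int) ≥ budget
    · rw [if_pos hb]
      have ht : (budget - (picks.length : Int)).toNat = 0 := by omega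
      refine ⟨by simp [ht], fun hfull => ?_⟩
      rw [hheads] at hfull
      exfalso
      simp only [List.length_cons] at hfull
      push_cast at hfull
      omega
    · rw [if_neg hb]
      have hget : PySem.List.pyGetD q (kn : Int) 0 = q[kn] := by
        simp [PySem.List.pyGetD_natCast, List.getD_eq_getElem?_getD, List.getElem?_eq_getElem hq]
      obtain ⟨ih1, ih2⟩ := ih (picks ++ [PySem.List.pyGetD q (kn : Int) 0])
        (if (q.length : Int) > (kn : Int) + 1 then nxt ++ [q] else nxt)
        (fun p hp => hne p (List.mem_cons_of_mem _ hp))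
      constructor
      · rw [ih1, hheads, hget]
        have harith : (budget - (picks.length : Int)).toNat =
            (budget - ((picks ++ [q[kn]]).length : Int)).toNat + 1 := by
          push_cast [List.length_append, List.length_cons, List.length_nil]
          omega
        rw [harith, List.take_succ_cons]
        simp [List.append_assoc]
      · intro hfull
        rw [hheads] at hfull
        have hfull' : (((picks ++ [PySem.List.pyGetD q (kn : Int) 0]).length : Int) +
            (((rest.map (fun q => q.drop kn)).filterMap List.head?).length : Int) < budget) := by
          simp only [List.length_cons] at hfull
          push_cast [List.length_append, List.length_cons, List.length_nil] at hfull ⊢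
          omega
        rw [ih2 hfull']
        by_cases hcond : (q.length : Int) > (kn : Int) + 1
        · rw [if_pos hcond, List.filter_cons_of_pos (by simpa using hcond), List.append_assoc]
          rfl
        · rw [if_neg hcond, List.filter_cons_of_neg (by simpa using hcond)]

theorem pvHeadsFilter (kn : Nat) (qs : List (List Int)) :
    (qs.map (fun q => q.drop kn)).filterMap List.head? =
      ((qs.filter (fun q => ((kn : Int) < (q.length : Int) : Bool))).map (fun q => q.drop kn)).filterMap List.head? := by
  induction qs with
  | nil => rfl
  | cons q t ih =>
    by_cases hq : (kn : Int) < (q.length : Int)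
    · have hd : (q.drop kn).head?.isSome := by
        rw [List.isSome_head?]
        simp only [ne_eq, List.drop_eq_nil_iff]
        omega
      simp only [List.map_cons, List.filterMap_cons]
      rw [List.filter_cons_of_pos (by simpa using hq)]
      simp only [List.map_cons, List.filterMap_cons]
      cases hh : (q.drop kn).head? with
      | none => rw [hh] at hd; simp at hd
      | some x => rw [ih]
    · have hd : (q.drop kn).head? = none := by
        rw [List.head?_eq_none_iff, List.drop_eq_nil_iff]
        omega
      simp only [List.map_cons, List.filterMap_cons, hd]
      rw [List.filter_cons_of_neg (by simpa using hq)]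
      exact ih

theorem pvLen_le_sum (qs : List (List Int)) (q : List Int) (h : q ∈ qs) :
    q.length ≤ (qs.map List.length).sum := by
  induction qs with
  | nil => simp at h
  | cons p t ih =>
    rcases List.mem_cons.mp h with rfl | h
    · simp
    · simp only [List.map_cons, List.sum_cons]
      have := ih h
      omega

theorem pvBloop (budget : Int) (qs : List (List Int)) :
    ∀ (fuel : Nat) (kn : Nat) (picks : List Int),
    (∀ q ∈ qs, q.length ≤ kn + fuel) →
    (picks.length : Int) ≤ budget →
    Bloop budget fuel (qs.filter (fun q => ((kn : Int) < (q.length : Int) : Bool))) (kn : Int) picks =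
      picks ++ (pvRounds (qs.map (fun q => q.drop kn))).take (budget - picks.length).toNat := by
  intro fuel
  induction fuel with
  | zero =>
    intro kn picks hfuel hple
    have hall : (qs.map (fun q => q.drop kn)).all List.isEmpty = true := by
      rw [List.all_eq_true]
      intro p hp
      rcases List.mem_map.mp hp with ⟨q, hq, rfl⟩
      have := hfuel q hq
      simp [List.isEmpty_iff, List.drop_eq_nil_iff]
      omega
    rw [pvRounds_nil hall]
    simp [Bloop]
  | succ f ih =>
    intro kn picks hfuel hple
    simp only [Bloop]
    by_cases hcd : qs.filter (fun q => ((kn : Int) < (q.length : Int) : Bool)) ≠ [] ∧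
        (picks.length : Int) < budget
    · rw [if_pos hcd]
      have hne : ∀ q ∈ qs.filter (fun q => ((kn : Int) < (q.length : Int) : Bool)), kn < q.length := by
        intro q hq
        have := (List.mem_filter.mp hq).2
        simp at this
        omega
      obtain ⟨s1, s2⟩ := pvBpass budget kn _ picks [] hne
      have hheadsF := pvHeadsFilter kn qs
      have hnall : ¬ ((qs.map (fun q => q.drop kn)).all List.isEmpty = true) := by
        rw [List.all_eq_true]
        intro hall
        rcases List.ne_nil_iff_exists_cons.mp hcd.1 with ⟨q, t, hqt⟩
        have hqm : q ∈ qs.filter (fun q => ((kn : Int) < (q.length : Int) : Bool)) := by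
          rw [hqt]; exact List.mem_cons_self ..
        have hq1 := (List.mem_filter.mp hqm).1
        have hq2 := (List.mem_filter.mp hqm).2
        have := hall (q.drop kn) (List.mem_map_of_mem hq1)
        simp [List.isEmpty_iff, List.drop_eq_nil_iff] at this hq2
        omega
      have htails : (qs.map (fun q => q.drop kn)).map List.tail =
          qs.map (fun q => q.drop (kn+1)) := by
        simp [List.map_map, Function.comp_def, List.tail_drop]
      have hro : pvRounds (qs.map (fun q => q.drop kn)) =
          (qs.map (fun q => q.drop kn)).filterMap List.head? ++
            pvRounds (qs.map (fun q => q.drop (kn+1))) := by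
        rw [pvRounds_cons hnall, htails]
      set heads := (qs.map (fun q => q.drop kn)).filterMap List.head? with hheads
      by_cases hfull : (picks.length : Int) + (heads.length : Int) < budget
      · have hfullA : ((picks.length : Int) +
            ((((qs.filter (fun q => ((kn : Int) < (q.length : Int) : Bool))).map
              (fun q => q.drop kn)).filterMap List.head?).length : Int) < budget) := by
          rw [← hheadsF]
          exact hfull
        have hr1len : ((Bpass budget (kn : Int)
            (qs.filter (fun q => ((kn : Int) < (q.length : Int) : Bool))) picks []).1.length : Int) =
            (picks.length : Int) + (heads.length : Int) := by
          rw [s1, ← hheadsF]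
          push_cast [List.length_append, List.length_take]
          omega
        have hr2 := s2 hfullA
        have hfilt : (qs.filter (fun q => ((kn : Int) < (q.length : Int) : Bool))).filter
            (fun q => ((kn : Int) + 1 < (q.length : Int) : Bool)) =
            qs.filter (fun q => (((kn+1 : Nat) : Int) < (q.length : Int) : Bool)) := by
          rw [List.filter_filter]
          refine List.filter_congr ?_
          intro q _
          by_cases h2 : (kn : Int) + 1 < (q.length : Int)
          · have h3 : (kn : Int) < (q.length : Int) := by omega
            have h4 : (((kn+1 : Nat)) : Int) < (q.length : Int) := by push_cast; omega
            simp [h2, h3, h4]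
          · have h4 : ¬ ((((kn+1 : Nat)) : Int) < (q.length : Int)) := by push_cast; omega
            simp [h2, h4]
        have hr2' : (Bpass budget (kn : Int)
            (qs.filter (fun q => ((kn : Int) < (q.length : Int) : Bool))) picks []).2 =
            qs.filter (fun q => (((kn+1 : Nat) : Int) < (q.length : Int) : Bool)) := by
          rw [hr2, List.nil_append, hfilt]
        rw [hr2']
        have hcast : ((kn : Int) + 1) = (((kn+1 : Nat)) : Int) := by push_cast; ring
        rw [hcast]
        rw [ih (kn+1) _ (fun q hq => by have := hfuel q hq; omega) (by rw [hr1len]; omega)]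
        rw [s1, ← hheadsF, hro]
        have htake : heads.length ≤ (budget - (picks.length : Int)).toNat := by omega
        rw [List.take_append, List.take_of_length_le htake, List.append_assoc]
        congr 3
        push_cast [List.length_append]
        omega
      · -- budget reached inside this pass
        have hr1len : ((Bpass budget (kn : Int)
            (qs.filter (fun q => ((kn : Int) < (q.length : Int) : Bool))) picks []).1.length : Int) =
            budget := by
          rw [s1, ← hheadsF]
          push_cast [List.length_append, List.length_take]
          omega
        have hres : Bloop budget f (Bpass budget (kn : Int)
            (qs.filter (fun q => ((kn : Int) < (q.length : Int) : Bool))) picks []).2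
            ((kn : Int) + 1) (Bpass budget (kn : Int)
            (qs.filter (fun q => ((kn : Int) < (q.length : Int) : Bool))) picks []).1 =
            (Bpass budget (kn : Int)
            (qs.filter (fun q => ((kn : Int) < (q.length : Int) : Bool))) picks []).1 := by
          cases f with
          | zero => rfl
          | succ f' =>
            simp only [Bloop]
            rw [if_neg (by push_neg; intro _; omega)]
        rw [hres, s1, ← hheadsF, hro]
        have ht : (budget - (picks.length : Int)).toNat ≤ heads.length := by omega
        rw [List.take_append]
        have hz : ((budget - (picks.length : Int)).toNat - heads.length) = 0 := by omega
        rw [hz]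
        simp
    · rw [if_neg hcd]
      push_neg at hcd
      by_cases hac : qs.filter (fun q => ((kn : Int) < (q.length : Int) : Bool)) = []
      · have hall : (qs.map (fun q => q.drop kn)).all List.isEmpty = true := by
          rw [List.all_eq_true]
          intro p hp
          rcases List.mem_map.mp hp with ⟨q, hq, rfl⟩
          have := List.filter_eq_nil_iff.mp hac q hq
          simp [List.isEmpty_iff, List.drop_eq_nil_iff]
          simp at this
          omega
        rw [pvRounds_nil hall]
        simp
      · have := hcd hac
        have ht : (budget - (picks.length : Int)).toNat = 0 := by omega
        simp [ht]

-- ===== VERDICT (by name: the statement is the Claim_ definition above) =====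
theorem pvTake_drop_zero_map (QS : List (List Int)) : QS.map (fun q => q.drop 0) = QS := by
  simp

theorem strategy_uncertainty_quota_spec : Claim_equal_strategy_uncertainty_quota := by
  unfold Claim_equal_strategy_uncertainty_quota
  intro cids scores labels budget mpc _ hpre
  unfold Spec_strategy_uncertainty_quota
  obtain ⟨hsc, hlab, hbud⟩ := hpre
  simp only [strategy_uncertainty_quota, strategy_uncertainty_quota_alt]
  by_cases hb0 : budget ≤ 0
  · -- empty budget: both loops stop immediately
    have hA : AloopA (Amem2 cids scores labels) (Aco cids scores labels) budget
        (2 * budget.toNat + (1 - mpc).toNat + 3) mpc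
        ⟨[], [], PySem.Dict.empty,
          (Aco cids scores labels).foldl (fun d cl => d.insert cl (0 : Int)) PySem.Dict.empty,
          false⟩ = [] := by
      simp only [AloopA]
      rw [if_neg (by simp; omega)]
    have hB : Bloop budget (((Bqueues cids scores labels).map List.length).sum + 1)
        (Bqueues cids scores labels) 0 [] = [] := by
      simp only [Bloop]
      rw [if_neg (by push_neg; intro _; simp; omega)]
    rw [hA, hB]
  · push_neg at hb0
    have hq := pvB_queues cids scores labels hlab
    have hperm := pvQS_flatten_perm cids scores labels
    have hnodup : (pvQS cids scores labels).flatten.Nodup := by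
      refine hperm.nodup_iff.mpr ?_
      exact PySem.List.nodup_pyRange_one 0 (cids.length : Int)
    have hlenf : ((pvQS cids scores labels).flatten.length : Int) = (cids.length : Int) := by
      rw [hperm.length_eq]
      unfold pvIdx
      rw [PySem.List.length_pyRange_one]
      omega
    have hmap0 : (Aco cids scores labels).map
        (fun cl => ((Amem2 cids scores labels).getD cl []).drop 0) = pvQS cids scores labels := by
      simp only [List.drop_zero]
      exact pvA_qs cids scores labels
    have hA : AloopA (Amem2 cids scores labels) (Aco cids scores labels) budget
        (2 * budget.toNat + (1 - mpc).toNat + 3) mpc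
        ⟨[], [], PySem.Dict.empty,
          (Aco cids scores labels).foldl (fun d cl => d.insert cl (0 : Int)) PySem.Dict.empty,
          false⟩ = (pvRounds (pvQS cids scores labels)).take budget.toNat := by
      rw [pvAloop (Amem2 cids scores labels) (Aco cids scores labels) budget
        (pvAco_nodup cids scores labels) (2 * budget.toNat + (1 - mpc).toNat + 3) 0 mpc _
        (fun cl _ => by
          show ((Aco cids scores labels).foldl (fun d cl => d.insert cl (0 : Int))
            PySem.Dict.empty).getD cl 0 = _
          rw [pvGetD_foldl_insert_const (0 : Int) _ cl]
          simp)
        (fun cl _ => by simp)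
        (fun cl _ x _ => by simp)
        (by rw [hmap0]; exact hnodup)
        (by simp; omega)
        (by rw [hmap0]; simp only [List.length_nil, Nat.cast_zero, zero_add]; omega)
        (by push_cast; omega)]
      rw [hmap0]
      simp
    have hfilt : (pvQS cids scores labels).filter
        (fun q => (((0 : Nat) : Int) < (q.length : Int) : Bool)) = pvQS cids scores labels := by
      rw [List.filter_eq_self]
      intro q hq'
      have := pvQS_nonempty cids scores labels q hq'
      simp only [decide_eq_true_eq]
      cases q with
      | nil => exact absurd rfl this
      | cons a l => simp
    have hB : Bloop budget (((Bqueues cids scores labels).map List.length).sum + 1)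
        (Bqueues cids scores labels) 0 [] =
        (pvRounds (pvQS cids scores labels)).take budget.toNat := by
      rw [hq]
      have hcall := pvBloop budget (pvQS cids scores labels)
        (((pvQS cids scores labels).map List.length).sum + 1) 0 []
        (fun q hq' => by have := pvLen_le_sum _ q hq'; omega)
        (by simp; omega)
      rw [hfilt] at hcall
      rw [show ((0 : Nat) : Int) = (0 : Int) from rfl] at hcall
      rw [hcall, pvTake_drop_zero_map]
      simp
    rw [hA, hB]
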